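-- pv_equiv track=rewrite | github.com/vitalex93/thesis-v1 | code/helper.py | match_lists
-- ===== SOURCE A (Python) =====
-- from collections import Counter
--
-- def match_lists(lst, dct):
--     """
--     Matches each item in `lst` with the list in `dct` that has the most common items.
--     Returns a dictionary with the item of `lst` as key and the keys of `dct` as values.
--     """
--     # Create a dictionary to store the counts of each item in the lists in `dct`
--     counts = {}
--     for k, v in dct.items():
--         counts[k] = Counter(v)
--
--     # Find the list in `dct` with the most common items for each item in `lst`
--     matches = {}
--     for item in lst:
--         max_count = 0
--         max_list = None
--         for k, v in counts.items():
--             count = v.get(item, 0)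
--             if count > max_count:
--                 max_count = count
--                 max_list = k
--         matches[item] = max_list
--
--     # Return a dictionary with the keys of `dct` as values
--     result = {}
--     for k in dct.keys():
--         result[k] = [item for item, lst in matches.items() if lst == k]
--
--     return result
-- ===== SOURCE B (Python) =====
-- from collections import Counter
--
-- def match_lists(lst, dct):
--     """Single pass: result lists are built directly; the intermediate `matches`
--     dict and the inversion loop of the original are gone."""
--     counters = [(k, Counter(v)) for k, v in dct.items()]
--     result = {k: [] for k in dct}
--     seen = set()
--     for item in lst:
--         if item in seen:
--             continue
--         seen.add(item)
--         if counters: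
--             key, c = max(counters, key=lambda kc: kc[1][item])
--             if c[item] > 0:
--                 result[key].append(item)
--     return result
-- ===== Notes on version B (the rewrite author's own statement) =====
-- stated objective: simpler
-- what changed: B drops A's intermediate matches dict and the separate inversion loop: it pre-creates result = {k: [] for k in dct} and, in one pass over lst (skipping items already seen), picks the best key with max(counters, key=...) and appends the item directly to result[best].
import Mathlib
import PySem

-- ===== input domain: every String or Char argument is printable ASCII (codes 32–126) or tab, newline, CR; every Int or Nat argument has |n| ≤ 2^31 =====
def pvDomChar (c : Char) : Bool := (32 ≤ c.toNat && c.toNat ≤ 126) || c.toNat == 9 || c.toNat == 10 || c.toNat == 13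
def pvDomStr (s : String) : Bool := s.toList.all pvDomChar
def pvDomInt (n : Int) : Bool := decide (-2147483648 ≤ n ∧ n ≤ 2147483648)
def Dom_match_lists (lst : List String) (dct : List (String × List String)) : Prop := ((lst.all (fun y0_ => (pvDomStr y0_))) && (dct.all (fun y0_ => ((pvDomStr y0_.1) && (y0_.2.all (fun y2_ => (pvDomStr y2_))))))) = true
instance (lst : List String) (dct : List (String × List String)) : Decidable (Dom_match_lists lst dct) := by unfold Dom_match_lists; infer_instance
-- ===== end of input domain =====

-- B merges A's argmax pass and inversion pass into one direct-building loop (objective: simpler).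

-- ===== PORT A =====
-- A's inner for-loop over counts.items() (the max_count / max_list accumulator), as a named helper
def pvArgmaxA (counts : List (String × PySem.Dict String Int)) (item : String) :
    Int × Option String :=
  counts.foldl (fun p kv =>
    let count := kv.2.getD item 0
    if count > p.1 then (count, some kv.1) else p) (0, none)

def match_lists (lst : List String) (dct : List (String × List String)) :
    List (String × List String) :=
  let counts : PySem.Dict String (PySem.Dict String Int) :=
    dct.foldl (fun d kv => d.insert kv.1 (PySem.Dict.counter kv.2)) PySem.Dict.empty
  let matchd : PySem.Dict String (Option String) :=
    lst.foldl (fun m item => m.insert item (pvArgmaxA counts.items item).2) PySem.Dict.empty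
  let result : PySem.Dict String (List String) :=
    dct.foldl (fun r kv =>
      r.insert kv.1 ((matchd.items.filter (fun p => p.2 == some kv.1)).map (fun p => p.1)))
      PySem.Dict.empty
  result.items

-- ===== PORT B =====
-- B's loop body, as a named helper
def pvStepB (counters : List (String × PySem.Dict String Int))
    (st : PySem.Dict String (List String) × PySem.Set String) (item : String) :
    PySem.Dict String (List String) × PySem.Set String :=
  if PySem.Set.contains st.2 item then st
  else
    match PySem.List.max? counters (fun kc => kc.2.getD item 0) with
    | none => (st.1, PySem.Set.add st.2 item)
    | some kc =>
        if kc.2.getD item 0 > 0 then (st.1.modify kc.1 [] (· ++ [item]), PySem.Set.add st.2 item)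
        else (st.1, PySem.Set.add st.2 item)

def match_lists_alt (lst : List String) (dct : List (String × List String)) :
    List (String × List String) :=
  let counters := dct.map (fun kv => (kv.1, PySem.Dict.counter kv.2))
  let result0 : PySem.Dict String (List String) :=
    dct.foldl (fun r kv => r.insert kv.1 []) PySem.Dict.empty
  (lst.foldl (pvStepB counters) (result0, PySem.Set.empty)).1.items

-- ===== PRECONDITION & SPEC =====
-- Pre_ excludes association lists with duplicate dct keys: such lists cannot arise from a
-- Python dict argument, and the assoc-list representation of that corner is accidental.
def Pre_match_lists (lst : List String) (dct : List (String × List String)) : Prop :=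
  (dct.map (fun kv => kv.1)).Nodup
instance (lst : List String) (dct : List (String × List String)) : Decidable (Pre_match_lists lst dct) := by unfold Pre_match_lists; infer_instance

def pvWitness_match_lists : List String × (List (String × List String)) :=
  (["a", "b", "a", "z"], [("x", ["a", "a", "b"]), ("y", ["b", "b"])])

def Spec_match_lists (lst : List String) (dct : List (String × List String)) (out : List (String × List String)) : Prop := out = match_lists_alt lst dct
instance (lst : List String) (dct : List (String × List String)) (out : List (String × List String)) : Decidable (Spec_match_lists lst dct out) := by unfold Spec_match_lists; infer_instance

-- ===== CLAIM (what is proved, stated in full; the proofs are below) =====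
def Claim_equal_match_lists : Prop := ∀ (lst : List String) (dct : List (String × List String)), Dom_match_lists lst dct → Pre_match_lists lst dct → Spec_match_lists lst dct (match_lists lst dct)

-- ===== LEMMAS AND PROOFS =====

-- B's loop body with the selection decision abstracted into `best`
def pvStepB' (best : String → Option String)
    (st : PySem.Dict String (List String) × PySem.Set String) (item : String) :
    PySem.Dict String (List String) × PySem.Set String :=
  if PySem.Set.contains st.2 item then st
  else
    match best item with
    | none => (st.1, PySem.Set.add st.2 item)
    | some k => (st.1.modify k [] (· ++ [item]), PySem.Set.add st.2 item)

-- the fold step of PySem.List.max? at key (fun kc => kc.2.getD item 0)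
def pvMaxStep (item : String) (acc : Option (String × PySem.Dict String Int))
    (x : String × PySem.Dict String Int) : Option (String × PySem.Dict String Int) :=
  match acc with
  | none => some x
  | some m => if m.2.getD item 0 < x.2.getD item 0 then some x else some m

-- invariant relating A's (max_count, max_list) state to the max?-fold state
def pvGood (item : String) (st : Int × Option String)
    (acc : Option (String × PySem.Dict String Int)) : Prop :=
  match acc with
  | none => st = (0, none)
  | some m => 0 ≤ m.2.getD item 0 ∧
      st = (if m.2.getD item 0 > 0 then (m.2.getD item 0, some m.1) else (0, none))

lemma pv_argmax_aux (item : String) :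
    ∀ (cnts : List (String × PySem.Dict String Int)) (st : Int × Option String)
      (acc : Option (String × PySem.Dict String Int)),
    (∀ kc ∈ cnts, 0 ≤ kc.2.getD item 0) → pvGood item st acc →
    pvGood item
      (cnts.foldl (fun p kv =>
        let count := kv.2.getD item 0
        if count > p.1 then (count, some kv.1) else p) st)
      (cnts.foldl (pvMaxStep item) acc) := by
  intro cnts
  induction cnts with
  | nil => intro st acc _ hg; simpa using hg
  | cons kc t ih =>
    intro st acc h hg
    have hkc : 0 ≤ kc.2.getD item 0 := h kc (by simp)
    simp only [List.foldl_cons]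
    apply ih _ _ (fun c hc => h c (List.mem_cons_of_mem _ hc))
    unfold pvMaxStep
    cases acc with
    | none =>
      simp only [pvGood] at hg
      subst hg
      exact ⟨hkc, rfl⟩
    | some m =>
      obtain ⟨hm, hst⟩ := hg
      subst hst
      have hmatch : (match some m with
          | none => some kc
          | some m => if m.2.getD item 0 < kc.2.getD item 0 then some kc else some m)
          = if m.2.getD item 0 < kc.2.getD item 0 then some kc else some m := rfl
      rw [hmatch]
      by_cases hlt : m.2.getD item 0 < kc.2.getD item 0
      · rw [if_pos hlt]
        refine ⟨hkc, ?_⟩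
        have h0 : kc.2.getD item 0 > 0 := by omega
        rw [if_pos h0]
        by_cases h1 : m.2.getD item 0 > 0
        · simp [h1, hlt, gt_iff_lt]
        · simp [h1, show (0:Int) < kc.2.getD item 0 from h0]
      · rw [if_neg hlt]
        refine ⟨hm, ?_⟩
        by_cases h1 : m.2.getD item 0 > 0
        · simp [h1, show ¬ (m.2.getD item 0 < kc.2.getD item 0) from hlt]
        · simp [h1, show ¬ ((0:Int) < kc.2.getD item 0) from by omega]

lemma pv_argmax_eq (cnts : List (String × PySem.Dict String Int)) (item : String)
    (hnn : ∀ kc ∈ cnts, 0 ≤ kc.2.getD item 0) :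
    pvArgmaxA cnts item =
      match PySem.List.max? cnts (fun kc => kc.2.getD item 0) with
      | none => (0, none)
      | some kc => if kc.2.getD item 0 > 0 then (kc.2.getD item 0, some kc.1) else (0, none) := by
  have h := pv_argmax_aux item cnts (0, none) none hnn (by simp [pvGood])
  have hmax : PySem.List.max? cnts (fun kc => kc.2.getD item 0)
      = cnts.foldl (pvMaxStep item) none := by
    unfold PySem.List.max?
    apply List.foldl_ext
    intro a b _
    cases a <;> rfl
  rw [hmax]
  unfold pvArgmaxA
  cases hfold : (cnts.foldl (pvMaxStep item) none) with
  | none =>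
      rw [hfold] at h
      simpa [pvGood] using h
  | some m =>
      rw [hfold] at h
      simp only [pvGood] at h
      simpa using h.2

-- insert of an already-present binding with its own value leaves the items list unchanged
lemma pv_insert_eq_self {ν : Type} (d : PySem.Dict String ν) (x : String) (v : ν)
    (hnd : d.keys.Nodup) (h : d.get? x = some v) : (d.insert x v).items = d.items := by
  have hc : d.contains x = true := by
    rw [PySem.Dict.contains_eq_isSome_get?, h]; rfl
  rw [PySem.Dict.items_insert_of_contains d v hc]
  have : ∀ p ∈ d.items, (if p.1 == x then (x, v) else p) = p := by
    intro p hp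
    by_cases hpx : p.1 = x
    · have hmem : (p.1, p.2) ∈ d.items := by simpa using hp
      have := PySem.Dict.get?_of_mem_items d hmem hnd
      rw [hpx, h] at this
      have hv : p.2 = v := by injection this.symm
      have hbeq : (p.1 == x) = true := by simp [hpx]
      rw [if_pos hbeq, ← hpx, ← hv]
    · simp [hpx]
  calc (d.items.map (fun p => if p.1 == x then (x, v) else p))
      = d.items.map id := List.map_congr_left this
    _ = d.items := List.map_id _

lemma pv_stepB_eq (counters : List (String × PySem.Dict String Int))
    (hnn : ∀ (item : String), ∀ kc ∈ counters, 0 ≤ kc.2.getD item 0) :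
    pvStepB counters = pvStepB' (fun item => (pvArgmaxA counters item).2) := by
  funext st item
  unfold pvStepB pvStepB'
  by_cases hc : PySem.Set.contains st.2 item = true
  · rw [if_pos hc, if_pos hc]
  · rw [if_neg hc, if_neg hc]
    beta_reduce
    rw [pv_argmax_eq counters item (hnn item)]
    cases hm : PySem.List.max? counters (fun kc => kc.2.getD item 0) with
    | none => rfl
    | some kc =>
        by_cases h0 : kc.2.getD item 0 > 0
        · simp only [h0, if_true]
        · simp only [h0, if_false]

-- the master loop invariant: B's single pass produces, per dct key, exactly the
-- filter-inversion of A's `matches` dict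
lemma pv_loop (dct : List (String × List String)) (best : String → Option String)
    (hnd : (dct.map (fun kv => kv.1)).Nodup)
    (hbest : ∀ x k, best x = some k → k ∈ dct.map (fun kv => kv.1)) :
    ∀ (l : List String) (M : PySem.Dict String (Option String))
      (R : PySem.Dict String (List String)) (seen : PySem.Set String),
    M.keys.Nodup →
    (∀ p ∈ M.items, p.2 = best p.1) →
    seen = M.keys →
    R.items = dct.map (fun kv => (kv.1,
      ((M.items.filter (fun p => p.2 == some kv.1)).map (fun p => p.1)))) →
    (l.foldl (pvStepB' best) (R, seen)).1.items
      = dct.map (fun kv => (kv.1,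
          (((l.foldl (fun m item => m.insert item (best item)) M).items.filter
            (fun p => p.2 == some kv.1)).map (fun p => p.1)))) := by
  intro l
  induction l with
  | nil => intro M R seen _ _ _ hR; simpa using hR
  | cons x t ih =>
    intro M R seen hMnd hval hseen hR
    simp only [List.foldl_cons]
    by_cases hc : M.contains x = true
    · -- x already seen: B skips, A overwrites with the same value
      have hsc : PySem.Set.contains seen x = true := by
        rw [hseen]
        have : x ∈ M.keys := (PySem.Dict.contains_iff_mem_keys M x).1 hc
        simpa [PySem.Set.contains] using this
      have hget : M.get? x = some (best x) := by
        cases hsome : M.get? x with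
        | none => rw [PySem.Dict.contains_eq_isSome_get?, hsome] at hc; simp at hc
        | some v =>
            have hmem := PySem.Dict.mem_items_of_get?_eq_some M hsome
            have := hval _ hmem
            simp only at this
            rw [this]
      have hitems : (M.insert x (best x)).items = M.items :=
        pv_insert_eq_self M x (best x) hMnd hget
      have hstep : pvStepB' best (R, seen) x = (R, seen) := by
        unfold pvStepB'
        rw [if_pos (show PySem.Set.contains (R, seen).2 x = true from hsc)]
      rw [hstep]
      have hkeys : (M.insert x (best x)).keys = M.keys := by
        simp only [PySem.Dict.keys, hitems]
      exact ih (M.insert x (best x)) R seen (by rw [hkeys]; exact hMnd)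
        (by rw [hitems]; exact hval) (by rw [hkeys]; exact hseen)
        (by rw [hitems]; exact hR)
    · -- x fresh
      have hc' : M.contains x = false := by simpa using hc
      have hxmem : x ∉ M.keys := fun hx => hc ((PySem.Dict.contains_iff_mem_keys M x).2 hx)
      have hxseen : x ∉ seen := by rw [hseen]; exact hxmem
      have hsc : PySem.Set.contains seen x = false := by
        rw [hseen]
        simpa [PySem.Set.contains] using hxmem
      have hitems : (M.insert x (best x)).items = M.items ++ [(x, best x)] :=
        PySem.Dict.items_insert_of_not_contains M _ hc'
      have hkeys : (M.insert x (best x)).keys = M.keys ++ [x] := by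
        simp [PySem.Dict.keys, hitems]
      have hseen' : PySem.Set.add seen x = (M.insert x (best x)).keys := by
        rw [hkeys, ← hseen]
        simp [PySem.Set.add, hxseen]
      have hMnd' : (M.insert x (best x)).keys.Nodup := by
        rw [hkeys]
        simp only [List.nodup_append, List.nodup_cons, List.nodup_nil, and_true]
        refine ⟨hMnd, ?_, ?_⟩
        · simp
        · intro a ha b hb
          simp only [List.mem_singleton] at hb
          subst hb
          exact fun h => hxmem (h ▸ ha)
      have hval' : ∀ p ∈ (M.insert x (best x)).items, p.2 = best p.1 := by
        intro p hp
        rw [hitems] at hp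
        rcases List.mem_append.1 hp with hp | hp
        · exact hval p hp
        · simp only [List.mem_singleton] at hp; subst hp; rfl
      cases hb : best x with
      | none =>
          rw [hb] at hitems hMnd' hval' hseen'
          have hstep : pvStepB' best (R, seen) x = (R, PySem.Set.add seen x) := by
            unfold pvStepB'
            rw [if_neg (show ¬ PySem.Set.contains (R, seen).2 x = true from by simp [hxseen])]
            rw [hb]
          rw [hstep]
          refine ih (M.insert x none) R (PySem.Set.add seen x) hMnd' hval' hseen' ?_
          rw [hR, hitems]
          refine List.map_congr_left (fun kv _ => ?_)
          simp [List.filter_append]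
      | some k =>
          rw [hb] at hitems hMnd' hval' hseen'
          have hstep : pvStepB' best (R, seen) x
              = (R.modify k [] (· ++ [x]), PySem.Set.add seen x) := by
            unfold pvStepB'
            rw [if_neg (show ¬ PySem.Set.contains (R, seen).2 x = true from by simp [hxseen])]
            rw [hb]
          rw [hstep]
          have hkdct : k ∈ dct.map (fun kv => kv.1) := hbest x k hb
          obtain ⟨kv0, hkv0, hk0⟩ := List.mem_map.1 hkdct
          have hRkeys : R.keys = dct.map (fun kv => kv.1) := by
            simp only [PySem.Dict.keys, hR, List.map_map]
            rfl
          have hRnd : R.keys.Nodup := by rw [hRkeys]; exact hnd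
          have hcontk : R.contains k = true :=
            (PySem.Dict.contains_iff_mem_keys R k).2 (by rw [hRkeys]; exact hkdct)
          have hentry : (k, ((M.items.filter (fun p => p.2 == some k)).map (fun p => p.1))) ∈ R.items := by
            rw [hR]
            exact List.mem_map.2 ⟨kv0, hkv0, by rw [hk0]⟩
          have hgetD : R.getD k [] = ((M.items.filter (fun p => p.2 == some k)).map (fun p => p.1)) :=
            PySem.Dict.getD_of_mem_items R hentry hRnd []
          have hmod : (R.modify k [] (· ++ [x])).items
              = R.items.map (fun p => if p.1 == k
                  then (k, ((M.items.filter (fun q => q.2 == some k)).map (fun q => q.1)) ++ [x])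
                  else p) := by
            unfold PySem.Dict.modify
            rw [hgetD]
            exact PySem.Dict.items_insert_of_contains R _ hcontk
          refine ih (M.insert x (some k)) _ (PySem.Set.add seen x) hMnd' hval' hseen' ?_
          rw [hmod, hR, List.map_map]
          refine List.map_congr_left (fun kv _ => ?_)
          simp only [Function.comp, hitems, List.filter_append, List.map_append]
          by_cases hkk : kv.1 = k
          · subst hkk
            simp
          · have h1 : (kv.1 == k) = false := by simp [hkk]
            have h2 : ((some k : Option String) == some kv.1) = false := by
              simp [Ne.symm hkk]
            simp [h1, h2]

-- fresh-key insert loops over dct (counts / result / result0) append in order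
lemma pv_fresh_items {ν : Type} (dct : List (String × List String))
    (hnd : (dct.map (fun kv => kv.1)).Nodup) (v : String × List String → ν) :
    (dct.foldl (fun d kv => d.insert kv.1 (v kv)) PySem.Dict.empty).items
      = dct.map (fun kv => (kv.1, v kv)) := by
  have h := PySem.Dict.items_foldl_insert_fresh dct (fun kv => kv.1) v PySem.Dict.empty
    (fun a _ => PySem.Dict.contains_empty _) hnd
  simpa using h

lemma pv_counters_nonneg (dct : List (String × List String)) (item : String) :
    ∀ kc ∈ dct.map (fun kv => (kv.1, PySem.Dict.counter kv.2)), 0 ≤ kc.2.getD item 0 := by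
  intro kc hkc
  obtain ⟨kv, _, rfl⟩ := List.mem_map.1 hkc
  rw [PySem.Dict.getD_counter]
  exact Int.natCast_nonneg _

-- ===== VERDICT (by name: the statement is the Claim_ definition above) =====
theorem match_lists_spec : Claim_equal_match_lists := by
  intro lst dct _ hpre
  unfold Spec_match_lists
  unfold match_lists match_lists_alt
  simp only []
  have hcounts := pv_fresh_items dct hpre (fun kv => PySem.Dict.counter kv.2)
  set counters := dct.map (fun kv => (kv.1, PySem.Dict.counter kv.2)) with hcdef
  set best : String → Option String := fun item => (pvArgmaxA counters item).2 with hbest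
  -- A's matches fold, with counts.items rewritten to the counters list
  have hA : (lst.foldl (fun m item =>
        m.insert item (pvArgmaxA (dct.foldl
          (fun d kv => d.insert kv.1 (PySem.Dict.counter kv.2)) PySem.Dict.empty).items item).2)
        PySem.Dict.empty)
      = lst.foldl (fun m item => m.insert item (best item)) PySem.Dict.empty := by
    rw [hcounts]
  have hbdom : ∀ x k, best x = some k → k ∈ dct.map (fun kv => kv.1) := by
    intro x k hk
    rw [hbest] at hk
    simp only at hk
    rw [pv_argmax_eq counters x (pv_counters_nonneg dct x)] at hk
    cases hm : PySem.List.max? counters (fun kc => kc.2.getD x 0) with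
    | none => rw [hm] at hk; simp at hk
    | some kc =>
        rw [hm] at hk
        by_cases h0 : kc.2.getD x 0 > 0
        · have hkc : kc ∈ counters := PySem.List.max?_mem hm
          obtain ⟨kv, hkv, hkveq⟩ := List.mem_map.1 hkc
          refine List.mem_map.2 ⟨kv, hkv, ?_⟩
          have hkk : kc.1 = k := by simpa [h0] using hk
          rw [← hkk, ← hkveq]
        · simp [h0] at hk
    -- (each branch closed above)
  rw [pv_stepB_eq counters (fun item => pv_counters_nonneg dct item)]
  rw [hA]
  have hloop := pv_loop dct best hpre hbdom lst PySem.Dict.empty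
    (dct.foldl (fun r kv => r.insert kv.1 []) PySem.Dict.empty) PySem.Set.empty
    PySem.Dict.nodup_keys_empty
    (by intro p hp; simp [PySem.Dict.empty] at hp)
    (by simp [PySem.Set.empty, PySem.Dict.keys, PySem.Dict.empty])
    (by rw [pv_fresh_items dct hpre (fun _ => [])]
        refine List.map_congr_left (fun kv _ => ?_)
        simp [PySem.Dict.empty])
  rw [hloop]
  exact pv_fresh_items dct hpre _
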